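-- pv_equiv track=rewrite | github.com/catanadj/taskwarrior-nautical | nautical_core/__init__.py | _split_inline_items_respecting_t_lists
-- ===== SOURCE A (Python) =====
-- def _split_inline_items_respecting_t_lists(s: str) -> list[str]:
--     """Split comma-list items, but keep commas inside '@t=HH:MM,HH:MM' values."""
--     if not s:
--         return []
--     out: list[str] = []
--     buf: list[str] = []
--     in_t_value = False
--     i, n = 0, len(s)
--
--     def flush():
--         tok = "".join(buf).strip()
--         if tok:
--             out.append(tok)
--         buf.clear()
--
--     while i < n:
--         ch = s[i]
--
--         if ch == "@":
--             if s[i:i+3].lower() == "@t=":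
--                 in_t_value = True
--             else:
--                 in_t_value = False
--             buf.append(ch)
--             i += 1
--             continue
--
--         if ch == ",":
--             if in_t_value:
--                 # If the comma separates times inside @t=..., keep it.
--                 # Heuristic: if the next token looks like a new list item (has '@' or starts with alpha / '-' / '(' / '|' / '&'),
--                 # treat comma as an item separator; otherwise treat it as part of the @t list (even if the token is invalid,
--                 # so @t validation can emit the correct error).
--                 j = i + 1
--                 while j < n and s[j].isspace():
--                     j += 1
--                 k = j
--                 while k < n and s[k] != ",":
--                     k += 1
--                 nxt = s[j:k].strip()
--                 if nxt and ("@" not in nxt) and (not nxt[0].isalpha()) and (nxt[0] not in "-(|&"):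
--                     buf.append(ch)
--                     i += 1
--                     continue
--                 # Otherwise comma ends this item
--                 flush()
--                 in_t_value = False
--                 i += 1
--                 continue
--
--             # Normal separator (not inside @t list)
--             flush()
--             i += 1
--             continue
--
--         buf.append(ch)
--         i += 1
--
--     flush()
--     return out
-- ===== SOURCE B (Python) =====
-- def _split_inline_items_respecting_t_lists(s: str) -> list[str]:
--     """Split on commas first, then re-merge segments that continue an open '@t=' time list."""
--     segs = s.split(',')
--     out: list[str] = []
--     parts = [segs[0]]
--     for nxt_raw in segs[1:]:
--         tok = ','.join(parts)
--         p = tok.rfind('@')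
--         t_open = p >= 0 and tok[p:p+3].lower() == '@t='
--         nxt = nxt_raw.strip()
--         if t_open and nxt and '@' not in nxt and not nxt[0].isalpha() and nxt[0] not in '-(|&':
--             parts.append(nxt_raw)
--         else:
--             tok = tok.strip()
--             if tok:
--                 out.append(tok)
--             parts = [nxt_raw]
--     tok = ','.join(parts).strip()
--     if tok:
--         out.append(tok)
--     return out
-- ===== Notes on version B (the rewrite author's own statement) =====
-- stated objective: faster
-- what changed: B replaces A's per-character index scan with its carried in_t flag and inner whitespace/comma lookahead loops by one str.split on commas followed by a fold over the segments, re-merging a segment into the current token (via join) when the token's last at-sign opens a time-list value and the stripped next segment looks like a time continuation.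
import Mathlib
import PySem

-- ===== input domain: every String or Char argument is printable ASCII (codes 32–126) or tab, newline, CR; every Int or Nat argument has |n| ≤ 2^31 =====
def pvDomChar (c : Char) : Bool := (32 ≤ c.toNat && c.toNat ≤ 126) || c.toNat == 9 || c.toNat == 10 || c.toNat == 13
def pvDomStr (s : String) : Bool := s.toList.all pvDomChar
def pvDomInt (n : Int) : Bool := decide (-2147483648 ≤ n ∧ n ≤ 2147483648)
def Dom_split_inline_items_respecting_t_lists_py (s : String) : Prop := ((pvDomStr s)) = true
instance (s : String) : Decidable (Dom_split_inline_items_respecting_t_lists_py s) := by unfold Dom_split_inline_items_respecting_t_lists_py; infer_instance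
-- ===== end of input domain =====

-- B replaces A's per-character scan (carried in_t flag, inner whitespace/comma index
-- loops) by one split on commas and a fold over the segments, re-merging a segment when
-- the accumulated token's last at-sign opens a time-list value (measured faster: bulk
-- split/join/rfind primitives instead of a per-character loop; same worst-case order).

-- ===== PORT A =====
-- the merge test on the stripped lookahead token: `nxt and "@" not in nxt and not
-- nxt[0].isalpha() and nxt[0] not in "-(|&"` — textually identical in A and in B
def pvNxtOk (nxt : List Char) : Bool :=
  match nxt with
  | [] => false
  | c0 :: _ =>
      !PySem.Chars.isIn ['@'] nxt && !PySem.Chars.isalpha c0 &&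
        !PySem.Chars.isIn [c0] ['-', '(', '|', '&']

-- flush(): append "".join(buf).strip() to out if non-empty
def pvFlushA (out : List (List Char)) (buf : List Char) : List (List Char) :=
  let tok := PySem.Chars.strip buf
  if tok ≠ [] then out ++ [tok] else out

-- A's `while i < n` scan, ported as structural recursion on the remaining characters
-- (s[i:i+3] = take 3 of the rest; the j-loop skipping whitespace and the k-loop scanning
-- to the next comma are dropWhile/takeWhile on the rest — exact, all indices move forward)
def pvLoopA : List (List Char) → List Char → Bool → List Char → List (List Char)
  | out, buf, _, [] => pvFlushA out buf
  | out, buf, in_t, ch :: rest =>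
    if ch = '@' then
      pvLoopA out (buf ++ [ch]) (PySem.Chars.lower ((ch :: rest).take 3) == ['@', 't', '=']) rest
    else if ch = ',' then
      if in_t then
        -- nxt = s[j:k].strip(): skip whitespace (j-loop), scan to the next comma (k-loop)
        if pvNxtOk (PySem.Chars.strip
            ((rest.dropWhile PySem.Chars.isspace).takeWhile (fun c => c ≠ ','))) then
          pvLoopA out (buf ++ [ch]) in_t rest
        else pvLoopA (pvFlushA out buf) [] false rest
      else pvLoopA (pvFlushA out buf) [] false rest
    else pvLoopA out (buf ++ [ch]) in_t rest

def split_inline_items_respecting_t_lists_py (s : String) : List String :=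
  if s.toList = [] then []
  else (pvLoopA [] [] false s.toList).map String.mk

-- ===== PORT B =====
-- Source B's merge test at a segment boundary: tok.rfind('@') opens '@t=' and the stripped
-- next segment passes the lookahead test
def pvCondB (tok : List Char) (nxtraw : List Char) : Bool :=
  let p := PySem.Chars.rfind tok ['@']
  let t_open := decide (0 ≤ p) &&
    (PySem.Chars.lower (PySem.List.slice tok (some p) (some (p + 3))) == ['@', 't', '='])
  t_open && pvNxtOk (PySem.Chars.strip nxtraw)

-- Source B's `for nxt_raw in segs[1:]` with state (out, parts), then the final flush
def pvLoopB : List (List Char) → List (List Char) → List (List Char) → List (List Char)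
  | out, parts, [] =>
      let tok := PySem.Chars.strip (PySem.Chars.join [','] parts)
      if tok ≠ [] then out ++ [tok] else out
  | out, parts, nxtraw :: segs =>
      if pvCondB (PySem.Chars.join [','] parts) nxtraw then
        pvLoopB out (parts ++ [nxtraw]) segs
      else
        pvLoopB
          (if PySem.Chars.strip (PySem.Chars.join [','] parts) ≠ [] then
            out ++ [PySem.Chars.strip (PySem.Chars.join [','] parts)]
          else out)
          [nxtraw] segs

def split_inline_items_respecting_t_lists_py_alt (s : String) : List String :=
  match PySem.Chars.splitOn s.toList [','] with
  | [] => []  -- unreachable: str.split never returns an empty list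
  | g :: gs => (pvLoopB [] [g] gs).map String.mk

-- ===== PRECONDITION & SPEC =====
def Spec_split_inline_items_respecting_t_lists_py (s : String) (out : List String) : Prop := out = split_inline_items_respecting_t_lists_py_alt s
instance (s : String) (out : List String) : Decidable (Spec_split_inline_items_respecting_t_lists_py s out) := by unfold Spec_split_inline_items_respecting_t_lists_py; infer_instance

-- ===== CLAIM (what is proved, stated in full; the proofs are below) =====
def Claim_equal_split_inline_items_respecting_t_lists_py : Prop := ∀ (s : String), Dom_split_inline_items_respecting_t_lists_py s → Spec_split_inline_items_respecting_t_lists_py s (split_inline_items_respecting_t_lists_py s)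

-- ===== LEMMAS AND PROOFS =====

-- reference scanner: A's scan with the carried in_t flag replaced by its value pvF,
-- recomputed from the buffer, and out-accumulation replaced by list append
def pvEmit (buf : List Char) : List (List Char) :=
  let tok := PySem.Chars.strip buf
  if tok = [] then [] else [tok]

-- the value of A's in_t flag after consuming `b` (with `rest` still to come) since the
-- last flush: set at the last '@' of b from the 3-char window of the original string
def pvF (b rest : List Char) : Bool :=
  let p := PySem.Chars.rfind b ['@']
  decide (0 ≤ p) &&
    (PySem.Chars.lower (((b ++ rest).drop p.toNat).take 3) == ['@', 't', '='])

def pvKeep (buf rest : List Char) : Bool :=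
  pvF buf (',' :: rest) &&
    pvNxtOk (PySem.Chars.strip
      ((rest.dropWhile PySem.Chars.isspace).takeWhile (fun c => c ≠ ',')))

def pvRef (buf : List Char) : List Char → List (List Char)
  | [] => pvEmit buf
  | ch :: rest =>
    if ch = ',' then
      if pvKeep buf rest then pvRef (buf ++ [ch]) rest
      else pvEmit buf ++ pvRef [] rest
    else pvRef (buf ++ [ch]) rest

-- my splitter: splitOn s [','] computed by plain structural recursion
def pvMySplit (pre : List Char) : List Char → List (List Char)
  | [] => [pre]
  | c :: rest => if c = ',' then pre :: pvMySplit [] rest else pvMySplit (pre ++ [c]) rest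

-- ---- rfind facts (sub = ['@']) ----
lemma pvRfind_nil : PySem.Chars.rfind [] ['@'] = -1 := by decide

lemma pvPrefixAt_cons (c : Char) (l : List Char) :
    (['@'].isPrefixOf (c :: l)) = (c == '@') := by
  simp [List.isPrefixOf, eq_comm]

lemma pvRfind_go_spec (s : List Char) : ∀ j : Nat,
    PySem.Chars.rfind.go s ['@'] j = -1 ∨
      ∃ p : Nat, p ≤ j ∧ PySem.Chars.rfind.go s ['@'] j = (p : Int) ∧
        (s.drop p).head? = some '@' := by
  intro j
  induction j with
  | zero =>
    rw [PySem.Chars.rfind.go]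
    split_ifs with h
    · right
      refine ⟨0, le_refl _, rfl, ?_⟩
      cases s with
      | nil => simp [List.isPrefixOf] at h
      | cons a l => rw [pvPrefixAt_cons] at h; simp_all
    · left; rfl
  | succ j ih =>
    rw [PySem.Chars.rfind.go]
    split_ifs with h
    · right
      refine ⟨j + 1, le_refl _, rfl, ?_⟩
      cases hd : s.drop (j + 1) with
      | nil => rw [hd] at h; simp [List.isPrefixOf] at h
      | cons a l => rw [hd, pvPrefixAt_cons] at h; simp_all
    · rcases ih with h1 | ⟨p, hp, he, hh⟩
      · left; exact h1
      · right; exact ⟨p, Nat.le_succ_of_le hp, he, hh⟩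

lemma pvRfind_go_append (b : List Char) (c : Char) : ∀ j : Nat, j < b.length →
    PySem.Chars.rfind.go (b ++ [c]) ['@'] j = PySem.Chars.rfind.go b ['@'] j := by
  intro j
  induction j with
  | zero =>
    intro h
    rw [PySem.Chars.rfind.go, PySem.Chars.rfind.go]
    cases b with
    | nil => simp at h
    | cons a l => simp only [List.cons_append, pvPrefixAt_cons]
  | succ j ih =>
    intro h
    rw [PySem.Chars.rfind.go, PySem.Chars.rfind.go]
    have hd : (b ++ [c]).drop (j + 1) = b.drop (j + 1) ++ [c] :=
      List.drop_append_of_le_length (by omega)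
    cases hb : b.drop (j + 1) with
    | nil => exfalso; have := List.length_drop (l := b) (i := j + 1); rw [hb] at this; simp at this; omega
    | cons a l =>
      rw [hd, hb]
      simp only [List.cons_append, pvPrefixAt_cons]
      rw [ih (by omega)]

lemma pvRfind_append_ne (b : List Char) (c : Char) (h : c ≠ '@') :
    PySem.Chars.rfind (b ++ [c]) ['@'] = PySem.Chars.rfind b ['@'] := by
  unfold PySem.Chars.rfind
  simp only [List.length_append, List.length_cons, List.length_nil]
  cases b with
  | nil =>
    simp only [List.nil_append, List.length_nil, PySem.Chars.rfind.go]
    simp [pvPrefixAt_cons, h]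
  | cons a t =>
    have hlen : (a :: t).length + 1 = (a :: t).length + 0 + 1 := by ring
    rw [PySem.Chars.rfind.go]
    have hdrop : ((a :: t) ++ [c]).drop ((a :: t).length + 1) = [] := by
      apply List.drop_eq_nil_of_le; simp
    rw [hdrop]
    simp only [List.isPrefixOf]
    rw [if_neg (by simp)]
    -- now go (b++[c]) (len b) vs go b (len b); unfold once more on both
    cases hl : (a :: t).length with
    | zero => simp at hl
    | succ m =>
      rw [PySem.Chars.rfind.go]
      have hd2 : ((a :: t) ++ [c]).drop (m + 1) = [c] := by
        have : (a :: t).drop (m + 1) = [] := by apply List.drop_eq_nil_of_le; omega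
        rw [List.drop_append_of_le_length (by omega), this]; rfl
      rw [hd2, pvPrefixAt_cons]
      rw [if_neg (by simp [h])]
      rw [show PySem.Chars.rfind.go (a :: t) ['@'] (m + 1) =
        PySem.Chars.rfind.go (a :: t) ['@'] m from ?_]
      · exact pvRfind_go_append _ _ _ (by omega)
      · rw [PySem.Chars.rfind.go]
        have : (a :: t).drop (m + 1) = [] := by apply List.drop_eq_nil_of_le; omega
        rw [this, if_neg (by simp [List.isPrefixOf])]

lemma pvRfind_append_at (b : List Char) :
    PySem.Chars.rfind (b ++ ['@']) ['@'] = (b.length : Int) := by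
  unfold PySem.Chars.rfind
  simp only [List.length_append, List.length_cons, List.length_nil]
  rw [PySem.Chars.rfind.go]
  have hdrop : (b ++ ['@']).drop (b.length + 0 + 1) = [] := by
    apply List.drop_eq_nil_of_le; simp
  rw [show b.length + 0 + 1 = b.length + 1 from by ring] at hdrop ⊢
  rw [hdrop, if_neg (by simp [List.isPrefixOf])]
  cases hl : b.length with
  | zero =>
    have hb : b = [] := List.eq_nil_of_length_eq_zero hl
    subst hb
    rw [PySem.Chars.rfind.go]
    simp
  | succ m =>
    rw [PySem.Chars.rfind.go]
    have hd2 : (b ++ ['@']).drop (m + 1) = ['@'] := by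
      have : b.drop (m + 1) = [] := by apply List.drop_eq_nil_of_le; omega
      rw [List.drop_append_of_le_length (by omega), this]; rfl
    rw [hd2, pvPrefixAt_cons]
    simp

lemma pvRfind_spec (b : List Char) (h : 0 ≤ PySem.Chars.rfind b ['@']) :
    (b.drop (PySem.Chars.rfind b ['@']).toNat).head? = some '@' := by
  rcases pvRfind_go_spec b b.length with h1 | ⟨p, hp, he, hh⟩
  · exfalso; unfold PySem.Chars.rfind at h; rw [h1] at h; omega
  · unfold PySem.Chars.rfind at *
    rw [he]; simpa using hh

-- ---- pvF stepping facts ----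
lemma pvF_nil (rest : List Char) : pvF [] rest = false := by
  simp [pvF, pvRfind_nil]

lemma pvF_snoc_ne (b : List Char) (c : Char) (rest : List Char) (h : c ≠ '@') :
    pvF (b ++ [c]) rest = pvF b (c :: rest) := by
  unfold pvF
  rw [pvRfind_append_ne b c h, List.append_assoc]
  rfl

lemma pvF_snoc_at (b rest : List Char) :
    pvF (b ++ ['@']) rest = (PySem.Chars.lower (('@' :: rest).take 3) == ['@', 't', '=']) := by
  unfold pvF
  rw [pvRfind_append_at b, List.append_assoc]
  simp only [Int.toNat_natCast, List.singleton_append]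
  rw [List.drop_left' rfl]
  simp

lemma pvF_comma (b rest : List Char) :
    pvF b (',' :: rest) =
      (decide (0 ≤ PySem.Chars.rfind b ['@']) &&
        (PySem.Chars.lower (PySem.List.slice b (some (PySem.Chars.rfind b ['@']))
            (some (PySem.Chars.rfind b ['@'] + 3))) == ['@', 't', '='])) := by
  by_cases hp : 0 ≤ PySem.Chars.rfind b ['@']
  · have hh := pvRfind_spec b hp
    set p := PySem.Chars.rfind b ['@'] with hpdef
    have hcast : p = ((p.toNat : Nat) : Int) := (Int.toNat_of_nonneg hp).symm
    rw [hcast, show ((p.toNat : Int) + 3) = ((p.toNat + 3 : Nat) : Int) by push_cast; ring,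
      PySem.List.slice_natCast]
    have htk : p.toNat + 3 - p.toNat = 3 := by omega
    rw [htk]
    obtain ⟨u, hu⟩ : ∃ u, b.drop p.toNat = '@' :: u := by
      cases hd : b.drop p.toNat with
      | nil => rw [hd] at hh; simp at hh
      | cons a l => rw [hd] at hh; simp at hh; exact ⟨l, by rw [hh]⟩
    have hlt : p.toNat < b.length := by
      by_contra hge
      rw [List.drop_eq_nil_of_le (by omega)] at hu; simp at hu
    have hdropapp : (b ++ ',' :: rest).drop p.toNat = '@' :: u ++ ',' :: rest := by
      rw [List.drop_append_of_le_length (by omega), hu]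
    unfold pvF
    dsimp only
    rw [hdropapp, hu]
    simp only [← hpdef, decide_eq_true hp, Bool.true_and]
    cases u with
    | nil =>
      simp [PySem.Chars.lower, PySem.Chars.lowerChar, PySem.Chars.isupper]
    | cons x u' =>
      cases u' with
      | nil =>
        simp [PySem.Chars.lower, PySem.Chars.lowerChar, PySem.Chars.isupper]
      | cons y u'' => simp
  · unfold pvF
    simp only [decide_eq_false hp, Bool.false_and]

-- ---- A = ref ----
lemma pvFlushA_eq (out : List (List Char)) (buf : List Char) :
    pvFlushA out buf = out ++ pvEmit buf := by
  simp only [pvFlushA, pvEmit]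
  split_ifs with h h' <;> simp_all

lemma pvLoopA_eq_ref (rest : List Char) : ∀ (out : List (List Char)) (buf : List Char)
    (in_t : Bool), in_t = pvF buf rest → pvLoopA out buf in_t rest = out ++ pvRef buf rest := by
  induction rest with
  | nil =>
    intro out buf in_t _
    simp [pvLoopA, pvRef, pvFlushA_eq]
  | cons ch rest ih =>
    intro out buf in_t hint
    rw [pvLoopA, pvRef]
    by_cases hat : ch = '@'
    · subst hat
      rw [if_pos rfl, if_neg (show ¬ ('@' = ',') by decide)]
      exact ih out (buf ++ ['@']) _ (by rw [pvF_snoc_at])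
    · by_cases hcm : ch = ','
      · subst hcm
        rw [if_neg (show ¬ (',' = '@') by decide), if_pos rfl, if_pos rfl]
        cases in_t with
        | false =>
          have hk : pvKeep buf rest = false := by
            unfold pvKeep
            rw [← hint]
            exact Bool.false_and _
          rw [if_neg (show ¬ (false = true) by decide), if_neg (by rw [hk]; decide)]
          rw [pvFlushA_eq, ih (out ++ pvEmit buf) [] false (by rw [pvF_nil]),
            List.append_assoc]
        | true =>
          have hkeq : pvKeep buf rest =
              pvNxtOk (PySem.Chars.strip
                ((rest.dropWhile PySem.Chars.isspace).takeWhile (fun c => c ≠ ','))) := by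
            unfold pvKeep
            rw [← hint]
            exact Bool.true_and _
          rw [if_pos rfl, hkeq]
          by_cases hok : pvNxtOk (PySem.Chars.strip
              ((rest.dropWhile PySem.Chars.isspace).takeWhile (fun c => c ≠ ','))) = true
          · rw [if_pos hok, if_pos hok]
            exact ih out (buf ++ [',']) true (by rw [pvF_snoc_ne _ _ _ (by decide), ← hint])
          · rw [if_neg hok, if_neg hok]
            rw [pvFlushA_eq, ih (out ++ pvEmit buf) [] false (by rw [pvF_nil]),
              List.append_assoc]
      · rw [if_neg hat, if_neg hcm, if_neg hcm]
        exact ih out (buf ++ [ch]) in_t (by rw [pvF_snoc_ne _ _ _ hat, ← hint])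

-- ---- ref segment absorption and B = ref ----
lemma pvRef_absorb (seg : List Char) (h : ',' ∉ seg) :
    ∀ (buf rest : List Char), pvRef buf (seg ++ rest) = pvRef (buf ++ seg) rest := by
  induction seg with
  | nil => intro buf rest; simp
  | cons c seg ih =>
    intro buf rest
    have hc : c ≠ ',' := fun he => h (he ▸ List.mem_cons_self)
    rw [List.cons_append, pvRef, if_neg hc]
    rw [ih (fun hm => h (List.mem_cons_of_mem _ hm)) (buf ++ [c]) rest]
    rw [List.append_assoc]
    rfl

lemma pvNxtA_eq_strip (g t : List Char) (hg : ',' ∉ g)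
    (ht : t = [] ∨ ∃ r, t = ',' :: r) :
    PySem.Chars.strip (((g ++ t).dropWhile PySem.Chars.isspace).takeWhile (fun c => c ≠ ','))
      = PySem.Chars.strip g := by
  have htw : t.takeWhile (fun c => decide (c ≠ ',')) = [] := by
    rcases ht with rfl | ⟨r, rfl⟩
    · rfl
    · simp
  induction g with
  | nil =>
    rcases ht with rfl | ⟨r, rfl⟩
    · rfl
    · rw [List.nil_append]
      rw [List.dropWhile_cons_of_neg (by decide)]
      rw [List.takeWhile_cons_of_neg (by decide)]
  | cons c g ih =>
    have hc : c ≠ ',' := fun he => hg (he ▸ List.mem_cons_self)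
    have hg' : ',' ∉ g := fun hm => hg (List.mem_cons_of_mem _ hm)
    by_cases hsp : PySem.Chars.isspace c = true
    · have hst : PySem.Chars.strip (c :: g) = PySem.Chars.strip g := by
        unfold PySem.Chars.strip PySem.Chars.lstrip
        rw [List.dropWhile_cons_of_pos hsp]
      rw [List.cons_append, List.dropWhile_cons_of_pos hsp, ih hg', hst]
    · rw [List.cons_append, List.dropWhile_cons_of_neg hsp]
      rw [List.takeWhile_cons_of_pos (by simp [hc])]
      rw [List.takeWhile_append_of_pos (by intro x hx; simp; intro he; exact hg' (he ▸ hx))]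
      rw [htw, List.append_nil]

lemma pvJoin_snoc (parts : List (List Char)) (g : List Char) (h : parts ≠ []) :
    PySem.Chars.join [','] (parts ++ [g]) =
      PySem.Chars.join [','] parts ++ ',' :: g := by
  induction parts with
  | nil => exact absurd rfl h
  | cons x t ih =>
    cases t with
    | nil =>
      rw [List.cons_append, List.nil_append, PySem.Chars.join_cons_cons,
        PySem.Chars.join_singleton, PySem.Chars.join_singleton, List.append_assoc]
      rfl
    | cons y t' =>
      show PySem.Chars.join [','] (x :: ((y :: t') ++ [g]))
          = PySem.Chars.join [','] (x :: y :: t') ++ ',' :: g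
      rw [show x :: ((y :: t') ++ [g]) = x :: y :: (t' ++ [g]) from rfl]
      rw [PySem.Chars.join_cons_cons, PySem.Chars.join_cons_cons]
      rw [show y :: (t' ++ [g]) = (y :: t') ++ [g] from rfl]
      rw [ih (by simp)]
      simp [List.append_assoc]

lemma pvKeep_eq_condB (b g pre : List Char) (hg : ',' ∉ g)
    (hpre : pre = [] ∨ ∃ r, pre = ',' :: r) :
    pvKeep b (g ++ pre) = pvCondB b g := by
  unfold pvKeep pvCondB
  rw [pvF_comma, pvNxtA_eq_strip g pre hg hpre]

lemma pvLoopB_eq_ref (segs : List (List Char)) (hs : ∀ x ∈ segs, ',' ∉ x) :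
    ∀ (parts : List (List Char)) (out : List (List Char)), parts ≠ [] →
      pvLoopB out parts segs =
        out ++ pvRef (PySem.Chars.join [','] parts) (segs.flatMap (fun g => ',' :: g)) := by
  induction segs with
  | nil =>
    intro parts out _
    rw [pvLoopB, List.flatMap_nil, pvRef, pvEmit]
    split_ifs with h1 <;> simp_all
  | cons g gs ih =>
    intro parts out hp
    have hg : ',' ∉ g := hs g List.mem_cons_self
    have hs' : ∀ x ∈ gs, ',' ∉ x := fun x hx => hs x (List.mem_cons_of_mem _ hx)
    have hpre : gs.flatMap (fun x => ',' :: x) = [] ∨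
        ∃ r, gs.flatMap (fun x => ',' :: x) = ',' :: r := by
      cases gs with
      | nil => left; rfl
      | cons y t => right; exact ⟨y ++ t.flatMap (fun x => ',' :: x), by simp⟩
    rw [pvLoopB]
    rw [show (g :: gs).flatMap (fun x => ',' :: x)
        = ',' :: (g ++ gs.flatMap (fun x => ',' :: x)) from by simp]
    rw [pvRef, if_pos rfl]
    rw [pvKeep_eq_condB _ _ _ hg hpre]
    by_cases hcond : pvCondB (PySem.Chars.join [','] parts) g = true
    · rw [if_pos hcond, if_pos hcond]
      rw [pvRef_absorb g hg (PySem.Chars.join [','] parts ++ [','])]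
      rw [ih hs' (parts ++ [g]) out (by simp)]
      rw [pvJoin_snoc parts g hp, List.append_assoc]
      rfl
    · rw [if_neg hcond, if_neg hcond]
      rw [pvRef_absorb g hg []]
      rw [ih hs' [g] _ (by simp)]
      rw [PySem.Chars.join_singleton]
      rw [show (if PySem.Chars.strip (PySem.Chars.join [','] parts) ≠ [] then
          out ++ [PySem.Chars.strip (PySem.Chars.join [','] parts)] else out)
        = pvFlushA out (PySem.Chars.join [','] parts) from rfl]
      rw [pvFlushA_eq, List.append_assoc, List.nil_append]

-- ---- splitOn characterization ----
lemma pvSplitOn_go_eq (fuel : Nat) : ∀ (l cur : List Char) (acc : List (List Char)),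
    l.length < fuel →
    PySem.Chars.splitOn.go [','] fuel l cur acc = acc.reverse ++ pvMySplit cur.reverse l := by
  induction fuel with
  | zero => intro l cur acc h; omega
  | succ f ih =>
    intro l cur acc h
    cases l with
    | nil =>
      rw [PySem.Chars.splitOn.go, pvMySplit]
      all_goals simp
    | cons c rest =>
      rw [PySem.Chars.splitOn.go]
      by_cases hc : c = ','
      · subst hc
        rw [if_pos (by simp [List.isPrefixOf])]
        rw [show List.drop ([','] : List Char).length (',' :: rest) = rest from rfl]
        rw [ih rest [] (cur.reverse :: acc) (by simp at h ⊢; omega)]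
        rw [pvMySplit, if_pos rfl]
        simp
      · rw [if_neg (by simp [List.isPrefixOf]; exact fun he => hc he.symm)]
        rw [ih rest (c :: cur) acc (by simp at h ⊢; omega)]
        rw [pvMySplit, if_neg hc]
        simp

lemma pvSplitOn_eq_mySplit (s : List Char) :
    PySem.Chars.splitOn s [','] = pvMySplit [] s := by
  unfold PySem.Chars.splitOn
  rw [pvSplitOn_go_eq (s.length + 1) s [] [] (by omega)]
  rfl

lemma pvMySplit_spec (s : List Char) : ∀ pre : List Char,
    ∃ g gs, pvMySplit pre s = (pre ++ g) :: gs ∧ ',' ∉ g ∧ (∀ x ∈ gs, ',' ∉ x) ∧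
      s = g ++ gs.flatMap (fun x => ',' :: x) := by
  induction s with
  | nil =>
    intro pre
    exact ⟨[], [], by simp [pvMySplit], by simp, by simp, rfl⟩
  | cons c rest ih =>
    intro pre
    by_cases hc : c = ','
    · subst hc
      obtain ⟨g, gs, hsp, hg, hgs, hdec⟩ := ih []
      rw [List.nil_append] at hsp
      refine ⟨[], g :: gs, ?_, by simp, ?_, ?_⟩
      · rw [pvMySplit, if_pos rfl, hsp, List.append_nil]
      · intro x hx
        rcases List.mem_cons.mp hx with rfl | hx'
        · exact hg
        · exact hgs x hx'
      · simp [hdec]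
    · obtain ⟨g, gs, hsp, hg, hgs, hdec⟩ := ih (pre ++ [c])
      refine ⟨c :: g, gs, ?_, ?_, hgs, by simp [hdec]⟩
      · rw [pvMySplit, if_neg hc, hsp, List.append_assoc]
        rfl
      · intro hm
        rcases List.mem_cons.mp hm with he | hm'
        · exact hc he.symm
        · exact hg hm'

-- ===== VERDICT (by name: the statement is the Claim_ definition above) =====
theorem split_inline_items_respecting_t_lists_py_spec : Claim_equal_split_inline_items_respecting_t_lists_py := by
  intro s _
  unfold Spec_split_inline_items_respecting_t_lists_py
  unfold split_inline_items_respecting_t_lists_py split_inline_items_respecting_t_lists_py_alt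
  rw [pvSplitOn_eq_mySplit]
  obtain ⟨g, gs, hsp, hg, hgs, hdec⟩ := pvMySplit_spec s.toList []
  rw [List.nil_append] at hsp
  rw [hsp]
  show (if s.toList = [] then [] else List.map String.mk (pvLoopA [] [] false s.toList)) =
    List.map String.mk (pvLoopB [] [g] gs)
  rw [pvLoopB_eq_ref gs hgs [g] [] (by simp)]
  by_cases hnil : s.toList = []
  · rw [if_pos hnil]
    rw [hnil] at hdec
    have hgnil : g = [] := by
      cases g with
      | nil => rfl
      | cons a l => simp at hdec
    have hgsnil : gs = [] := by
      cases gs with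
      | nil => rfl
      | cons a l =>
        rw [hgnil] at hdec
        simp [List.flatMap_cons] at hdec
    subst hgnil; subst hgsnil
    simp [pvRef, pvEmit, PySem.Chars.join, PySem.Chars.strip, PySem.Chars.lstrip,
      PySem.Chars.rstrip, List.intercalate]
  · rw [if_neg hnil]
    rw [pvLoopA_eq_ref s.toList [] [] false (by rw [pvF_nil])]
    have habs : pvRef [] s.toList = pvRef g (gs.flatMap (fun x => ',' :: x)) := by
      rw [hdec, pvRef_absorb g hg [] (gs.flatMap (fun x => ',' :: x))]
      rfl
    rw [habs]
    simp [PySem.Chars.join_singleton]
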